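-- pv_equiv track=rewrite | github.com/simulatedScience/Twisty_Puzzle_Program | src/puzzle_analysis_modules/symmetry_detection.py | get_piece_signatures
-- ===== SOURCE A (Python) =====
-- def get_piece_signatures(move: list[list[int]], pieces: list[set[int]]) -> tuple[int]:
--     """
--     Map a move to the number of points in each piece affected by the move.
--
--     Args:
--         move (list[list[int]]): The move represented as a list of cycles.
--         pieces (list[set[int]]): The list of pieces, where each piece is a set of point indices.
--
--     Returns:
--         tuple[int, ...]: An ordered tuple representing the count of points in each piece affected by the move.
--     """
--     # Convert move cycles to a set of affected points
--     affected_points = set(point for cycle in move for point in cycle)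
--
--     # Count the number of affected points in each piece
--     affected_counts = []
--     for piece in pieces:
--         count = len(piece.intersection(affected_points))
--         if count > 0:
--             affected_counts.append(count)
--
--     return tuple(sorted(affected_counts))
-- ===== SOURCE B (Python) =====
-- def get_piece_signatures(move: list[list[int]], pieces: list["set[int]"]) -> tuple:
--     # Inverted index: point -> list of indices of pieces containing that point.
--     index = {}
--     for i, piece in enumerate(pieces):
--         for point in piece:
--             index[point] = index.get(point, []) + [i]
--
--     affected_points = set(point for cycle in move for point in cycle)
--
--     # Count affected points per piece by scanning affected points against the index.
--     counter = {}
--     for point in affected_points: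
--         for i in index.get(point, []):
--             counter[i] = counter.get(i, 0) + 1
--
--     return tuple(sorted(counter.values()))
-- ===== Notes on version B (the rewrite author's own statement) =====
-- stated objective: alternative
-- what changed: Instead of intersecting each piece with the affected-point set, B builds an inverted index from point to the piece indices containing it, then scans the affected points against that index incrementing a per-piece counter, and sorts the counter's values.
import Mathlib
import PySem

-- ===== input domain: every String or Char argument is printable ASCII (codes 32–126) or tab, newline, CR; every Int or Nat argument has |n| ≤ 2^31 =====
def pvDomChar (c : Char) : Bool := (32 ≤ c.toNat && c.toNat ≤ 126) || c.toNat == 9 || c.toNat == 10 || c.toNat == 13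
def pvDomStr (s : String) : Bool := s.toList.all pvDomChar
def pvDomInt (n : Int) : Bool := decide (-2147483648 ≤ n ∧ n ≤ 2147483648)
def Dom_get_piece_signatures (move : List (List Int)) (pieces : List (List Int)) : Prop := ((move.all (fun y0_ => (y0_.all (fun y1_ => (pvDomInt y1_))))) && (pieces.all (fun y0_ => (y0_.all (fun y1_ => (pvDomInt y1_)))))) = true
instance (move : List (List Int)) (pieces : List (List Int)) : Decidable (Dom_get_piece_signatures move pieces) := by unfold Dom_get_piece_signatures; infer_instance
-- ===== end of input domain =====

-- B replaces A's per-piece intersection with an inverted index (point -> piece indices)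
-- scanned over the affected points into a counter; an alternative traversal, not claimed faster.

-- ===== PORT A =====
def get_piece_signatures (move : List (List Int)) (pieces : List (List Int)) : List Int :=
  let affected_points : PySem.Set Int := PySem.Set.ofList (move.flatMap (fun cycle => cycle))
  let affected_counts : List Int := pieces.foldl (fun acc piece =>
      let count : Int := PySem.Set.len (PySem.Set.inter (PySem.Set.ofList piece) affected_points)
      if count > 0 then acc ++ [count] else acc) []
  PySem.List.sorted affected_counts (fun x => x)

-- ===== PORT B =====
def get_piece_signatures_alt (move : List (List Int)) (pieces : List (List Int)) : List Int :=
  let index : PySem.Dict Int (List Int) :=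
    (PySem.List.enumerate pieces).foldl (fun d ip =>
        (PySem.Set.ofList ip.2).foldl (fun d point => d.modify point [] (fun l => l ++ [ip.1])) d)
      PySem.Dict.empty
  let affected_points : PySem.Set Int := PySem.Set.ofList (move.flatMap (fun cycle => cycle))
  let counter : PySem.Dict Int Int :=
    affected_points.foldl (fun c point =>
        (index.getD point []).foldl (fun c i => c.insert i (c.getD i 0 + 1)) c)
      PySem.Dict.empty
  PySem.List.sorted counter.values (fun x => x)

-- ===== PRECONDITION & SPEC =====
def Spec_get_piece_signatures (move : List (List Int)) (pieces : List (List Int)) (out : List Int) : Prop := out = get_piece_signatures_alt move pieces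
instance (move : List (List Int)) (pieces : List (List Int)) (out : List Int) : Decidable (Spec_get_piece_signatures move pieces out) := by unfold Spec_get_piece_signatures; infer_instance

-- ===== CLAIM (what is proved, stated in full; the proofs are below) =====
def Claim_equal_get_piece_signatures : Prop := ∀ (move : List (List Int)) (pieces : List (List Int)), Dom_get_piece_signatures move pieces → Spec_get_piece_signatures move pieces (get_piece_signatures move pieces)

-- ===== LEMMAS AND PROOFS =====

-- A's per-piece count; B's inverted index flattened to (point, piece-index) pairs;
-- and the list of piece indices B's counter effectively counts
def pvCnt (aff : PySem.Set Int) (piece : List Int) : Int :=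
  PySem.Set.len (PySem.Set.inter (PySem.Set.ofList piece) aff)

def pvPairs (pieces : List (List Int)) : List (Int × Int) :=
  (PySem.List.enumerate pieces).flatMap (fun ip => (PySem.Set.ofList ip.2).map (fun p => (p, ip.1)))

def pvL (aff : PySem.Set Int) (pieces : List (List Int)) : List Int :=
  aff.flatMap (fun pt => ((pvPairs pieces).filter (fun q => q.1 == pt)).map (fun q => q.2))

-- counting elements shared by two duplicate-free lists is symmetric
lemma pv_swap_filter_len (xs ys : List Int) (hx : xs.Nodup) (hy : ys.Nodup) :
    (xs.filter (fun x => ys.contains x)).length = (ys.filter (fun y => xs.contains y)).length := by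
  have n1 : (xs.filter (fun x => ys.contains x)).Nodup := hx.filter _
  have n2 : (ys.filter (fun y => xs.contains y)).Nodup := hy.filter _
  rw [← List.toFinset_card_of_nodup n1, ← List.toFinset_card_of_nodup n2]
  congr 1
  ext a
  simp
  tauto

-- every index produced by enumerate is at least the start value
lemma pv_enum_ge {α : Type} (xs : List α) (s : Int) :
    ∀ p ∈ PySem.List.enumerate xs s, s ≤ p.1 := by
  induction xs generalizing s with
  | nil => simp [PySem.List.enumerate]
  | cons x t ih =>
    intro p hp
    simp [PySem.List.enumerate] at hp
    rcases hp with h | h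
    · simp [h]
    · have := ih (s+1) p h; omega

-- enumerate indices are strictly increasing
lemma pv_enum_pairwise {α : Type} (xs : List α) (s : Int) :
    (PySem.List.enumerate xs s).Pairwise (fun a b => a.1 < b.1) := by
  induction xs generalizing s with
  | nil => simp [PySem.List.enumerate]
  | cons x t ih =>
    simp only [PySem.List.enumerate]
    exact List.Pairwise.cons (fun p hp => by have := pv_enum_ge t (s+1) p hp; simp; omega) (ih (s+1))

-- reindexing a filter+map over enumerate back to the plain list
lemma pv_enum_filter_map {α β : Type} (xs : List α) (s : Int) (p : α → Bool) (f : α → β) :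
    ((PySem.List.enumerate xs s).filter (fun ip => p ip.2)).map (fun ip => f ip.2)
      = (xs.filter p).map f := by
  induction xs generalizing s with
  | nil => simp [PySem.List.enumerate]
  | cons x t ih =>
    simp only [PySem.List.enumerate, List.filter_cons]
    by_cases h : p x
    · simp [h, ih]
    · simp [h, ih]

-- how many times piece index i occurs in the inverted-index bucket of point pt
lemma pv_count_pairs (pieces : List (List Int)) (s i pt : Int) (piece : List Int)
    (h : (i, piece) ∈ PySem.List.enumerate pieces s) :
    ((((PySem.List.enumerate pieces s).flatMap
        (fun ip => (PySem.Set.ofList ip.2).map (fun p => (p, ip.1)))).filter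
        (fun q => q.1 == pt)).map (fun q => q.2)).count i
      = (PySem.Set.ofList piece).count pt := by
  induction pieces generalizing s with
  | nil => simp [PySem.List.enumerate] at h
  | cons x t ih =>
    simp only [PySem.List.enumerate, List.flatMap_cons, List.filter_append, List.map_append,
      List.count_append]
    have hhead : ((((PySem.Set.ofList x).map (fun p => (p, s))).filter
        (fun q => q.1 == pt)).map (fun q => (q.2 : Int))).count i
        = if i = s then (PySem.Set.ofList x).count pt else 0 := by
      rw [List.filter_map, List.map_map]
      have hc : ((fun q : Int × Int => q.2) ∘ fun p => (p, s)) = fun _ => s := rfl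
      rw [hc]
      by_cases hi : i = s
      · rw [if_pos hi, hi, List.count_eq_countP, List.countP_map]
        have h3 : ((fun x : Int => x == s) ∘ fun _ : Int => s) = fun _ => true := by
          funext p; simp
        rw [h3, List.countP_true]
        have h2 : ((fun q : Int × Int => q.1 == pt) ∘ fun p => (p, s)) = (fun p => p == pt) := rfl
        rw [h2]
        simp [List.count_eq_countP, List.countP_eq_length_filter]
      · rw [if_neg hi, List.count_eq_zero]
        intro hm
        rcases List.mem_map.mp hm with ⟨p, _, hp⟩
        exact hi hp.symm
    have htail : ∀ j : Int, j ≤ s → ((((PySem.List.enumerate t (s+1)).flatMap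
        (fun ip => (PySem.Set.ofList ip.2).map (fun p => (p, ip.1)))).filter
        (fun q => q.1 == pt)).map (fun q => q.2)).count j = 0 := by
      intro j hj
      rw [List.count_eq_zero]
      intro hm
      rcases List.mem_map.mp hm with ⟨q, hq, hq2⟩
      have hq' := (List.mem_filter.mp hq).1
      rcases List.mem_flatMap.mp hq' with ⟨ip, hip, hqip⟩
      rcases List.mem_map.mp hqip with ⟨p, _, hpq⟩
      have hq1 : q.2 = ip.1 := by rw [← hpq]
      have hge := pv_enum_ge t (s+1) ip hip
      omega
    simp only [PySem.List.enumerate] at h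
    rcases List.mem_cons.mp h with heq | hmem
    · have hi : i = s := by simpa using congrArg Prod.fst heq
      have hpc : piece = x := by simpa using congrArg Prod.snd heq
      rw [hhead, if_pos hi, hpc, htail i (le_of_eq hi)]
      omega
    · have hige : s + 1 ≤ i := by
        have := pv_enum_ge t (s+1) (i, piece) hmem; simpa using this
      rw [hhead, if_neg (by omega), ih (s+1) hmem]
      omega

-- total multiplicity of piece index i in B's flattened count list
lemma pv_count_pvL (aff : PySem.Set Int) (pieces : List (List Int)) (i : Int) (piece : List Int)
    (h : (i, piece) ∈ PySem.List.enumerate pieces 0) :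
    (pvL aff pieces).count i
      = (List.filter (fun pt => (PySem.Set.ofList piece).contains pt) aff).length := by
  show (List.flatMap _ aff).count i = _
  induction (aff : List Int) with
  | nil => simp
  | cons pt rest ih =>
    rw [List.flatMap_cons, List.count_append, ih, List.filter_cons]
    have hcp := pv_count_pairs pieces 0 i pt piece h
    simp only [pvPairs]
    rw [hcp]
    by_cases hm : pt ∈ PySem.Set.ofList piece
    · have h1 : (PySem.Set.ofList piece).count pt = 1 :=
        List.count_eq_one_of_mem (PySem.Set.nodup_ofList piece) hm
      simp [hm]
      omega
    · have h0 : (PySem.Set.ofList piece).count pt = 0 := List.count_eq_zero.mpr hm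
      simp [h0, hm]

-- membership in B's flattened count list
lemma pv_mem_pvL (aff : PySem.Set Int) (pieces : List (List Int)) (i : Int) :
    i ∈ pvL aff pieces ↔
      ∃ piece, (i, piece) ∈ PySem.List.enumerate pieces 0 ∧
        ∃ pt ∈ (aff : List Int), pt ∈ PySem.Set.ofList piece := by
  constructor
  · intro hm
    rcases List.mem_flatMap.mp hm with ⟨pt, hpt, hin⟩
    rcases List.mem_map.mp hin with ⟨q, hq, hq2⟩
    have hqf := List.mem_filter.mp hq
    rcases List.mem_flatMap.mp hqf.1 with ⟨ip, hip, hqip⟩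
    rcases List.mem_map.mp hqip with ⟨p, hp, hpq⟩
    refine ⟨ip.2, ?_, p, ?_, hp⟩
    · have : ip = (ip.1, ip.2) := rfl
      rw [← hq2, ← hpq]
      exact this ▸ hip
    · have hq1 : p = pt := by
        have h2 := hqf.2
        rw [← hpq] at h2
        simpa using h2
      rw [hq1]; exact hpt
  · rintro ⟨piece, hen, pt, hpt, hp⟩
    apply List.mem_flatMap.mpr
    refine ⟨pt, hpt, ?_⟩
    apply List.mem_map.mpr
    refine ⟨(pt, i), ?_, rfl⟩
    apply List.mem_filter.mpr
    refine ⟨?_, by simp⟩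
    apply List.mem_flatMap.mpr
    exact ⟨(i, piece), hen, List.mem_map.mpr ⟨pt, hp, rfl⟩⟩

-- A's port evaluates to the sorted positive per-piece counts
lemma pv_A_eq (move : List (List Int)) (pieces : List (List Int)) :
    get_piece_signatures move pieces
      = PySem.List.sorted
          ((pieces.filter (fun piece => 0 < pvCnt (PySem.Set.ofList (move.flatMap (fun c => c))) piece)).map
            (fun piece => pvCnt (PySem.Set.ofList (move.flatMap (fun c => c))) piece))
          (fun x => x) := by
  have h := PySem.List.foldl_append_if
      (fun piece => decide (0 < pvCnt (PySem.Set.ofList (move.flatMap (fun c => c))) piece))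
      (fun piece => pvCnt (PySem.Set.ofList (move.flatMap (fun c => c))) piece)
      pieces []
  simp only [decide_eq_true_eq, pvCnt] at h
  show PySem.List.sorted (pieces.foldl _ []) _ = _
  rw [show (fun (acc : List Int) (piece : List Int) =>
        if 0 < PySem.Set.len (PySem.Set.inter (PySem.Set.ofList piece)
            (PySem.Set.ofList (move.flatMap (fun cycle => cycle)))) then
          acc ++ [PySem.Set.len (PySem.Set.inter (PySem.Set.ofList piece)
            (PySem.Set.ofList (move.flatMap (fun cycle => cycle))))]
        else acc) = (fun acc piece =>
        if 0 < PySem.Set.len (PySem.Set.inter (PySem.Set.ofList piece)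
            (PySem.Set.ofList (move.flatMap (fun c => c)))) then
          acc ++ [PySem.Set.len (PySem.Set.inter (PySem.Set.ofList piece)
            (PySem.Set.ofList (move.flatMap (fun c => c))))]
        else acc) from rfl, h]
  rfl

-- B's port evaluates to the sorted multiplicities of its flattened count list
lemma pv_B_eq (move : List (List Int)) (pieces : List (List Int)) :
    get_piece_signatures_alt move pieces
      = PySem.List.sorted
          ((PySem.Set.ofList (pvL (PySem.Set.ofList (move.flatMap (fun c => c))) pieces)).map
            (fun i => ((pvL (PySem.Set.ofList (move.flatMap (fun c => c))) pieces).count i : Int)))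
          (fun x => x) := by
  unfold get_piece_signatures_alt
  dsimp only
  set aff := PySem.Set.ofList (move.flatMap (fun cycle => cycle)) with haff
  have hidx : (PySem.List.enumerate pieces).foldl (fun d ip =>
        (PySem.Set.ofList ip.2).foldl (fun d point => d.modify point [] (fun l => l ++ [ip.1])) d)
      PySem.Dict.empty
      = (pvPairs pieces).foldl (fun d q => d.modify q.1 [] (fun l => l ++ [q.2])) PySem.Dict.empty := by
    rw [pvPairs, List.foldl_flatMap]
    congr 1
    funext d ip
    rw [List.foldl_map]
  simp only [hidx]
  have hbucket : ∀ pt : Int,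
      (((pvPairs pieces).foldl (fun d q => d.modify q.1 [] (fun l => l ++ [q.2]))
          PySem.Dict.empty).getD pt [])
        = ((pvPairs pieces).filter (fun q => q.1 == pt)).map (fun q => q.2) := by
    intro pt
    rw [PySem.Dict.getD_foldl_modify_append]
    simp
  simp only [hbucket]
  have hcnt : aff.foldl (fun c pt =>
        (((pvPairs pieces).filter (fun q => q.1 == pt)).map (fun q => q.2)).foldl
          (fun c i => c.insert i (c.getD i 0 + 1)) c)
      PySem.Dict.empty
      = PySem.Dict.counter (pvL aff pieces) := by
    rw [← PySem.Dict.foldl_insert_getD_add_one_eq_counter, pvL, List.foldl_flatMap]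
  simp only [hcnt]
  have hv : (PySem.Dict.counter (pvL aff pieces)).values
      = (PySem.Set.ofList (pvL aff pieces)).map (fun i => ((pvL aff pieces).count i : Int)) := by
    have hvi : (PySem.Dict.counter (pvL aff pieces)).values
        = ((PySem.Dict.counter (pvL aff pieces)).items).map (fun p => p.2) := rfl
    rw [hvi, PySem.Dict.items_counter, List.map_map]
    rfl
  rw [hv]

-- the multiplicity in B's flattened list equals A's intersection count
lemma pv_key (aff : PySem.Set Int) (hnd : (aff : List Int).Nodup)
    (pieces : List (List Int)) (i : Int) (piece : List Int)
    (h : (i, piece) ∈ PySem.List.enumerate pieces 0) :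
    (((pvL aff pieces).count i : Int)) = pvCnt aff piece := by
  rw [pv_count_pvL aff pieces i piece h]
  have hswap := pv_swap_filter_len aff (PySem.Set.ofList piece)
    hnd (PySem.Set.nodup_ofList _)
  rw [pvCnt]
  show ((List.filter (fun pt => List.contains (PySem.Set.ofList piece) pt) aff).length : Int)
    = ((List.filter (fun x => List.contains aff x) (PySem.Set.ofList piece)).length : Int)
  exact_mod_cast hswap

-- the count is positive exactly when the piece shares a point with the affected set
lemma pv_pos_iff (aff : PySem.Set Int) (piece : List Int) :
    0 < pvCnt aff piece ↔ ∃ pt ∈ (aff : List Int), pt ∈ PySem.Set.ofList piece := by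
  show (0 : Int) < ((List.filter (fun x => List.contains aff x) (PySem.Set.ofList piece)).length : Int) ↔ _
  rw [Int.natCast_pos, ← List.countP_eq_length_filter, List.countP_pos_iff]
  constructor
  · rintro ⟨y, hy, hc⟩
    refine ⟨y, ?_, hy⟩
    simpa [PySem.Set.contains] using hc
  · rintro ⟨pt, hpt, hp⟩
    refine ⟨pt, hp, ?_⟩
    simpa [PySem.Set.contains] using hpt

-- the two ports agree
lemma pv_main (move : List (List Int)) (pieces : List (List Int)) :
    get_piece_signatures move pieces = get_piece_signatures_alt move pieces := by
  rw [pv_A_eq, pv_B_eq]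
  set aff := PySem.Set.ofList (move.flatMap (fun c => c)) with haff
  have hndaff : (aff : List Int).Nodup := by
    rw [haff]; exact PySem.Set.nodup_ofList _
  set L := pvL aff pieces with hLdef
  rw [← pv_enum_filter_map pieces 0 (fun piece => decide (0 < pvCnt aff piece))
        (fun piece => pvCnt aff piece)]
  apply (PySem.List.sorted_id_eq_sorted_id_iff_perm _ _).mpr
  have hmc : ((PySem.List.enumerate pieces 0).filter (fun ip => decide (0 < pvCnt aff ip.2))).map
        (fun ip => pvCnt aff ip.2)
      = (((PySem.List.enumerate pieces 0).filter (fun ip => decide (0 < pvCnt aff ip.2))).map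
        (fun ip => ip.1)).map (fun i => ((L.count i : Int))) := by
    rw [List.map_map]
    apply List.map_congr_left
    intro ip hip
    have hmem : ip ∈ PySem.List.enumerate pieces 0 := List.mem_of_mem_filter hip
    exact (pv_key aff hndaff pieces ip.1 ip.2 hmem).symm
  rw [hmc]
  apply List.Perm.map
  have hnd1 : (((PySem.List.enumerate pieces 0).filter
      (fun ip => decide (0 < pvCnt aff ip.2))).map (fun ip => ip.1)).Nodup := by
    have hpw := (pv_enum_pairwise pieces 0).filter (fun ip => decide (0 < pvCnt aff ip.2))
    have hm : (((PySem.List.enumerate pieces 0).filter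
        (fun ip => decide (0 < pvCnt aff ip.2))).map (fun ip => ip.1)).Pairwise (· < ·) :=
      List.pairwise_map.mpr hpw
    exact hm.imp (fun h => ne_of_lt h)
  apply (List.perm_ext_iff_of_nodup hnd1 (PySem.Set.nodup_ofList _)).mpr
  intro a
  rw [PySem.Set.mem_ofList, hLdef, pv_mem_pvL]
  constructor
  · intro hm
    rcases List.mem_map.mp hm with ⟨ip, hip, hip1⟩
    have hf := List.mem_filter.mp hip
    refine ⟨ip.2, ?_, ?_⟩
    · rw [← hip1]; exact hf.1
    · exact (pv_pos_iff aff ip.2).mp (by simpa using hf.2)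
  · rintro ⟨piece, hen, hex⟩
    apply List.mem_map.mpr
    refine ⟨(a, piece), List.mem_filter.mpr ⟨hen, ?_⟩, rfl⟩
    simpa using (pv_pos_iff aff piece).mpr hex

-- ===== VERDICT (by name: the statement is the Claim_ definition above) =====
theorem get_piece_signatures_spec : Claim_equal_get_piece_signatures := by
  intro move pieces _
  unfold Spec_get_piece_signatures
  exact pv_main move pieces
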